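-- pv_equiv track=rewrite | github.com/leeminHong1990/BaiBianShuangKou | scripts/common/utility.py | checkIsSerialPair
-- ===== SOURCE A (Python) =====
-- def getCard2NumDict(cards):
-- 	card2NumDict = {}
-- 	for t in cards:
-- 		if t not in card2NumDict:
-- 			card2NumDict[t] = 1
-- 		else:
-- 			card2NumDict[t] += 1
-- 	return card2NumDict
--
-- def checkIsSerialPair(cards):
-- 	if len(cards) < 6 or len(cards)%2 != 0:
-- 		return False
-- 	card2NumDict = getCard2NumDict(cards)
-- 	#张数
-- 	for card in card2NumDict:
-- 		if card2NumDict[card] != 2: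
-- 			return False
-- 	#顺序
-- 	serial = card2NumDict.keys()
-- 	serial = sorted(serial)
-- 	for i in range(len(serial) -1):
-- 		if serial[i] + 1 != serial[i+1]:
-- 			return False
-- 	return True
-- ===== SOURCE B (Python) =====
-- def checkIsSerialPair(cards):
-- 	if len(cards) < 6 or len(cards) % 2 != 0:
-- 		return False
-- 	counts = {}
-- 	lo = cards[0]
-- 	hi = cards[0]
-- 	for t in cards:
-- 		counts[t] = counts.get(t, 0) + 1
-- 		if t < lo:
-- 			lo = t
-- 		if t > hi:
-- 			hi = t
-- 	return all(n == 2 for n in counts.values()) and hi - lo + 1 == len(counts)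
-- ===== Notes on version B (the rewrite author's own statement) =====
-- stated objective: alternative
-- what changed: replaces the sort of the distinct cards plus the adjacent-difference scan by a single counting pass that also tracks the running min and max, deciding consecutiveness by max-min+1 == number of distinct cards
import Mathlib
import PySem

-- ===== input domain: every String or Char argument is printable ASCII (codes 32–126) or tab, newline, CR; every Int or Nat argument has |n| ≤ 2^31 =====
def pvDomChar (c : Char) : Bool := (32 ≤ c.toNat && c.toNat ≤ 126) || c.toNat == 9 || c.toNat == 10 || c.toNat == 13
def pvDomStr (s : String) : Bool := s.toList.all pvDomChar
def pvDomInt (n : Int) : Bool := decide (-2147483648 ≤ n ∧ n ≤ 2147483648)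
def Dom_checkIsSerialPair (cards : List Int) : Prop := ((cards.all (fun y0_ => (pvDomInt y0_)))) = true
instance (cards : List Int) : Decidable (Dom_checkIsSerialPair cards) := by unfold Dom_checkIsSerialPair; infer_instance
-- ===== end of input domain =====

-- B replaces A's sort of the distinct cards plus adjacent-difference scan by a single
-- counting pass that also tracks the running min and max (consecutive iff max-min+1 = #distinct).

-- ===== PORT A =====
def getCard2NumDict (cards : List Int) : PySem.Dict Int Int :=
  cards.foldl
    (fun d t => if d.contains t = false then d.insert t 1 else d.modify t 0 (· + 1))
    PySem.Dict.empty

def checkIsSerialPair (cards : List Int) : Bool :=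
  if cards.length < 6 ∨ cards.length % 2 ≠ 0 then false
  else
    let d := getCard2NumDict cards
    if ¬ (d.keys.all fun card => d.getD card 0 == 2) then false
    else
      let serial := PySem.List.sorted d.keys (fun x => x)
      (PySem.List.pyRange 0 ((serial.length : Int) - 1) 1).all fun i =>
        PySem.List.pyGetD serial i 0 + 1 == PySem.List.pyGetD serial (i + 1) 0

-- ===== PORT B =====
def checkIsSerialPair_alt (cards : List Int) : Bool :=
  if cards.length < 6 ∨ cards.length % 2 ≠ 0 then false
  else
    match cards with
    | [] => false  -- unreachable: the length guard already returned false
    | c0 :: _ =>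
      let st := cards.foldl
        (fun (s : PySem.Dict Int Int × Int × Int) t =>
          (s.1.insert t (s.1.getD t 0 + 1),
           if t < s.2.1 then t else s.2.1,
           if t > s.2.2 then t else s.2.2))
        (PySem.Dict.empty, c0, c0)
      (st.1.values.all fun n => n == 2) && (st.2.2 - st.2.1 + 1 == (st.1.size : Int))

-- ===== PRECONDITION & SPEC =====
def Spec_checkIsSerialPair (cards : List Int) (out : Bool) : Prop := out = checkIsSerialPair_alt cards
instance (cards : List Int) (out : Bool) : Decidable (Spec_checkIsSerialPair cards out) := by unfold Spec_checkIsSerialPair; infer_instance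

-- ===== CLAIM (what is proved, stated in full; the proofs are below) =====
def Claim_equal_checkIsSerialPair : Prop := ∀ (cards : List Int), Dom_checkIsSerialPair cards → Spec_checkIsSerialPair cards (checkIsSerialPair cards)

-- ===== LEMMAS AND PROOFS =====

-- A's counting loop builds exactly Counter(cards)
lemma dictA_eq_counter (cards : List Int) :
    getCard2NumDict cards = PySem.Dict.counter cards := by
  have hstep : (fun (d : PySem.Dict Int Int) t =>
      if d.contains t = false then d.insert t 1 else d.modify t 0 (· + 1))
      = fun (d : PySem.Dict Int Int) t => d.insert t (d.getD t 0 + 1) := by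
    funext d t
    split_ifs with h
    · rw [PySem.Dict.getD_of_not_contains d 0 h]
      norm_num
    · rfl
  rw [getCard2NumDict, hstep, PySem.Dict.foldl_insert_getD_add_one_eq_counter]

-- B's running-min / running-max branches are `min` / `max`
lemma step_min_eq : (fun (lo t : Int) => if t < lo then t else lo) = min := by
  funext lo t; simp only [min_def]; split_ifs <;> omega

lemma step_max_eq : (fun (hi t : Int) => if t > hi then t else hi) = max := by
  funext hi t; simp only [max_def]; split_ifs <;> omega

-- the property A's adjacency loop checks
def goodP (s : List Int) : Prop := ∀ (k : Nat) (hk : k + 1 < s.length), s[k] + 1 = s[k + 1]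

-- over a strictly increasing list the gap between positions bounds the value gap
lemma mono_gap (s : List Int) (hpw : s.Pairwise (· < ·)) :
    ∀ (j : Nat) (hj : j < s.length) (i : Nat) (hij : i ≤ j),
      s[i]'(by omega) + ((j : Int) - (i : Int)) ≤ s[j] := by
  intro j
  induction j with
  | zero =>
    intro hj i hij
    have h0 : i = 0 := by omega
    subst h0; simp
  | succ n ih =>
    intro hj i hij
    rcases Nat.eq_or_lt_of_le hij with h | hlt
    · subst h; simp
    · have h1 := ih (by omega) i (by omega)
      have h2 : s[n]'(by omega) < s[n + 1]'hj :=
        List.pairwise_iff_getElem.mp hpw n (n + 1) (by omega) hj (by omega)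
      push_cast at h1 ⊢
      omega

lemma good_affine (s : List Int) (hg : goodP s) :
    ∀ (j : Nat) (hj : j < s.length), s[j] = s[0]'(by omega) + (j : Int) := by
  intro j
  induction j with
  | zero => intro hj; simp
  | succ n ih =>
    intro hj
    have h1 := hg n hj
    have h2 := ih (by omega)
    push_cast
    omega

-- the heart of the equivalence: consecutive adjacents ⟺ last = first + length - 1
lemma good_iff (s : List Int) (hpw : s.Pairwise (· < ·)) (hlen : 0 < s.length) :
    goodP s ↔ s[s.length - 1]'(by omega) = s[0]'(by omega) + (s.length : Int) - 1 := by
  constructor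
  · intro hg
    have h := good_affine s hg (s.length - 1) (by omega)
    rw [h]
    have : ((s.length - 1 : Nat) : Int) = (s.length : Int) - 1 := by omega
    rw [this]; ring
  · intro hlast k hk
    have h1 := mono_gap s hpw k (by omega) 0 (by omega)
    have h2 := mono_gap s hpw (s.length - 1) (by omega) (k + 1) (by omega)
    have h3 : s[k]'(by omega) < s[k + 1]'hk :=
      List.pairwise_iff_getElem.mp hpw k (k + 1) (by omega) hk (by omega)
    omega

-- A's index loop over `range(len(serial)-1)` checks exactly goodP
lemma allA_iff_good (s : List Int) :
    ((PySem.List.pyRange 0 ((s.length : Int) - 1) 1).all fun i =>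
        PySem.List.pyGetD s i 0 + 1 == PySem.List.pyGetD s (i + 1) 0) = true
      ↔ goodP s := by
  rw [List.all_eq_true]
  constructor
  · intro h k hk
    have hmem : (k : Int) ∈ PySem.List.pyRange 0 ((s.length : Int) - 1) 1 :=
      PySem.List.mem_pyRange_one.mpr (by constructor <;> omega)
    have hk' := h _ hmem
    rw [beq_iff_eq, PySem.List.pyGetD_natCast, List.getD_eq_getElem _ _ (by omega)] at hk'
    have e : ((k : Int) + 1) = ((k + 1 : Nat) : Int) := by push_cast; ring
    rw [e, PySem.List.pyGetD_natCast, List.getD_eq_getElem _ _ hk] at hk'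
    exact hk'
  · intro h i hi
    have hb := PySem.List.mem_pyRange_one.mp hi
    have hi0 : (0 : Int) ≤ i := hb.1
    have hkn : i = ((i.toNat : Nat) : Int) := by omega
    rw [beq_iff_eq, hkn, PySem.List.pyGetD_natCast,
      List.getD_eq_getElem _ _ (by omega : i.toNat < s.length)]
    have e : ((i.toNat : Nat) : Int) + 1 = ((i.toNat + 1 : Nat) : Int) := by push_cast; ring
    rw [e, PySem.List.pyGetD_natCast,
      List.getD_eq_getElem _ _ (by omega : i.toNat + 1 < s.length)]
    exact h i.toNat (by omega)

-- the running min over cards is the head of sorted(set(cards))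
lemma foldl_min_eq (cards : List Int) (c0 : Int) (hc0 : c0 ∈ cards)
    (hlen : 0 < (PySem.List.sorted (PySem.Set.ofList cards) (fun x => x)).length) :
    List.foldl min c0 cards
      = (PySem.List.sorted (PySem.Set.ofList cards) (fun x => x))[0] := by
  have hmem : ∀ x : Int, x ∈ PySem.List.sorted (PySem.Set.ofList cards) (fun x => x) ↔ x ∈ cards := by
    intro x
    rw [PySem.List.mem_sorted, PySem.Set.mem_ofList]
  have h1 := PySem.List.foldl_min_le cards c0
  have hm_mem : List.foldl min c0 cards ∈ cards := by
    rcases PySem.List.foldl_min_mem cards c0 with h | h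
    · rw [h]; exact hc0
    · exact h
  apply le_antisymm
  · exact h1.2 _ ((hmem _).mp (List.getElem_mem hlen))
  · obtain ⟨i, hi, hei⟩ := List.mem_iff_getElem.mp ((hmem _).mpr hm_mem)
    calc (PySem.List.sorted (PySem.Set.ofList cards) (fun x => x))[0]
        ≤ (PySem.List.sorted (PySem.Set.ofList cards) (fun x => x))[i] :=
          PySem.List.sorted_id_getElem_mono _ (Nat.zero_le i) hi
      _ = _ := hei

-- the running max over cards is the last element of sorted(set(cards))
lemma foldl_max_eq (cards : List Int) (c0 : Int) (hc0 : c0 ∈ cards)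
    (hlen : 0 < (PySem.List.sorted (PySem.Set.ofList cards) (fun x => x)).length) :
    List.foldl max c0 cards
      = (PySem.List.sorted (PySem.Set.ofList cards) (fun x => x))[
          (PySem.List.sorted (PySem.Set.ofList cards) (fun x => x)).length - 1]'(by omega) := by
  have hmem : ∀ x : Int, x ∈ PySem.List.sorted (PySem.Set.ofList cards) (fun x => x) ↔ x ∈ cards := by
    intro x
    rw [PySem.List.mem_sorted, PySem.Set.mem_ofList]
  have h1 := PySem.List.le_foldl_max cards c0
  have hm_mem : List.foldl max c0 cards ∈ cards := by
    rcases PySem.List.foldl_max_mem cards c0 with h | h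
    · rw [h]; exact hc0
    · exact h
  apply le_antisymm
  · obtain ⟨i, hi, hei⟩ := List.mem_iff_getElem.mp ((hmem _).mpr hm_mem)
    calc List.foldl max c0 cards
        = (PySem.List.sorted (PySem.Set.ofList cards) (fun x => x))[i] := hei.symm
      _ ≤ _ := PySem.List.sorted_id_getElem_mono _ (by omega) (by omega)
  · exact h1.2 _ ((hmem _).mp (List.getElem_mem (by omega)))

lemma ports_eq (cards : List Int) : checkIsSerialPair cards = checkIsSerialPair_alt cards := by
  by_cases hg : cards.length < 6 ∨ cards.length % 2 ≠ 0
  · simp only [checkIsSerialPair, checkIsSerialPair_alt, if_pos hg]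
  · obtain ⟨c0, rest, rfl⟩ : ∃ c0 r, cards = c0 :: r := by
      cases cards with
      | nil => exact absurd (Or.inl (by simp)) hg
      | cons a t => exact ⟨a, t, rfl⟩
    have hc0 : c0 ∈ c0 :: rest := List.mem_cons_self
    have hsne : 0 < (PySem.List.sorted (PySem.Set.ofList (c0 :: rest)) (fun x => x)).length := by
      have := (PySem.List.mem_sorted (PySem.Set.ofList (c0 :: rest)) (fun x => x) false c0).mpr
        ((PySem.Set.mem_ofList _ _).mpr hc0)
      exact List.length_pos_of_mem this
    -- split B's triple fold into its three independent folds
    have hsplit : List.foldl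
        (fun (s : PySem.Dict Int Int × Int × Int) t =>
          (s.1.insert t (s.1.getD t 0 + 1),
           if t < s.2.1 then t else s.2.1,
           if t > s.2.2 then t else s.2.2))
        (PySem.Dict.empty, c0, c0) (c0 :: rest)
        = (PySem.Dict.counter (c0 :: rest),
           List.foldl min c0 (c0 :: rest), List.foldl max c0 (c0 :: rest)) := by
      rw [PySem.List.foldl_prod_mk
        (fun (d : PySem.Dict Int Int) t => d.insert t (d.getD t 0 + 1))
        (fun (p : Int × Int) t => (if t < p.1 then t else p.1, if t > p.2 then t else p.2))]
      rw [PySem.List.foldl_prod_mk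
        (fun (lo : Int) t => if t < lo then t else lo)
        (fun (hi : Int) t => if t > hi then t else hi)]
      rw [step_min_eq, step_max_eq, PySem.Dict.foldl_insert_getD_add_one_eq_counter]
    simp only [checkIsSerialPair, checkIsSerialPair_alt, if_neg hg, hsplit, dictA_eq_counter]
    -- the two "every count is 2" checks agree
    have hc1 : ((PySem.Dict.counter (c0 :: rest)).keys.all fun card =>
          (PySem.Dict.counter (c0 :: rest)).getD card 0 == 2)
        = ((PySem.Dict.counter (c0 :: rest)).values.all fun n => n == 2) := by
      rw [PySem.Dict.values_eq_map_keys _ (PySem.Dict.nodup_keys_counter _) 0, List.all_map]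
      rfl
    -- the two consecutiveness checks agree
    have hsize : ((PySem.Dict.counter (c0 :: rest)).size : Int)
        = ((PySem.List.sorted (PySem.Set.ofList (c0 :: rest)) (fun x => x)).length : Int) := by
      have h1 : (PySem.Dict.counter (c0 :: rest)).size
          = (PySem.Dict.counter (c0 :: rest)).keys.length := by
        simp [PySem.Dict.size, PySem.Dict.keys]
      rw [h1, PySem.Dict.keys_counter, PySem.List.length_sorted]
    have hc2 : ((PySem.List.pyRange 0
          (((PySem.List.sorted (PySem.Dict.counter (c0 :: rest)).keys (fun x => x)).length : Int) - 1) 1).all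
            fun i => PySem.List.pyGetD (PySem.List.sorted (PySem.Dict.counter (c0 :: rest)).keys (fun x => x)) i 0 + 1
              == PySem.List.pyGetD (PySem.List.sorted (PySem.Dict.counter (c0 :: rest)).keys (fun x => x)) (i + 1) 0)
        = (List.foldl max c0 (c0 :: rest) - List.foldl min c0 (c0 :: rest) + 1
            == ((PySem.Dict.counter (c0 :: rest)).size : Int)) := by
      rw [PySem.Dict.keys_counter]
      rw [Bool.eq_iff_iff, allA_iff_good,
        good_iff _ (PySem.List.sorted_ofList_pairwise_lt _) hsne, beq_iff_eq,
        foldl_min_eq _ _ hc0 hsne, foldl_max_eq _ _ hc0 hsne, hsize]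
      omega
    rw [hc2, hc1]
    cases h : ((PySem.Dict.counter (c0 :: rest)).values.all fun n => n == 2) <;> simp

-- ===== VERDICT (by name: the statement is the Claim_ definition above) =====
theorem checkIsSerialPair_spec : Claim_equal_checkIsSerialPair := by
  intro cards _
  unfold Spec_checkIsSerialPair
  exact ports_eq cards
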